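-- pv_equiv track=rewrite | github.com/D0niL19/QnA_hack | api/fastapi_server/utils.py | find_intervals
-- ===== SOURCE A (Python) =====
-- def find_intervals(indexies):
--     """
--     Находит интервалы индексов с учетом значений на -2, -1, +1 и +2 от каждого исходного индекса.
--
--     Для каждого индекса добавляются значения на 2 позиции влево и вправо, после чего находят
--     последовательные смежные интервалы.
--
--     :param indexies: Список исходных индексов
--     :return: Список интервалов в виде пар [начало, конец]
--     """
--     numbers = []
--     # Создание расширенного списка индексов с добавлением -2, -1, +1, +2
--     for i in indexies:
--         numbers += [i - 2, i - 1, i, i + 1, i + 2]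
--
--     # Удаление дубликатов и сортировка
--     numbers = list(set(numbers))
--     numbers.sort()
--
--     intervals = []
--     start = numbers[0]
--
--     # Поиск последовательных интервалов
--     for i in range(1, len(numbers)):
--         # Если текущее число не является последовательным с предыдущим, завершаем интервал
--         if numbers[i] != numbers[i - 1] + 1:
--             intervals.append([start, numbers[i - 1]])
--             start = numbers[i]
--
--     # Добавление последнего интервала
--     intervals.append([start, numbers[-1]])
--
--     return intervals
-- ===== SOURCE B (Python) =====
-- def find_intervals(indexies):
--     """Merge the original indices directly: each index i covers [i-2, i+2];
--     sorted indices whose covers touch or overlap (gap <= 5) form one interval."""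
--     s = sorted(indexies)
--     start = s[0] - 2
--     end = s[0] + 2
--     intervals = []
--     for i in s[1:]:
--         if i - 2 <= end + 1:
--             end = max(end, i + 2)
--         else:
--             intervals.append([start, end])
--             start, end = i - 2, i + 2
--     intervals.append([start, end])
--     return intervals
-- ===== Notes on version B (the rewrite author's own statement) =====
-- stated objective: faster
-- what changed: B sorts and merges the n original indices directly (a new interval starts when the gap between consecutive sorted indices exceeds 5) instead of materialising, deduplicating and sorting the 5n-element expanded point list and scanning it for unit gaps.
import Mathlib
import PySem

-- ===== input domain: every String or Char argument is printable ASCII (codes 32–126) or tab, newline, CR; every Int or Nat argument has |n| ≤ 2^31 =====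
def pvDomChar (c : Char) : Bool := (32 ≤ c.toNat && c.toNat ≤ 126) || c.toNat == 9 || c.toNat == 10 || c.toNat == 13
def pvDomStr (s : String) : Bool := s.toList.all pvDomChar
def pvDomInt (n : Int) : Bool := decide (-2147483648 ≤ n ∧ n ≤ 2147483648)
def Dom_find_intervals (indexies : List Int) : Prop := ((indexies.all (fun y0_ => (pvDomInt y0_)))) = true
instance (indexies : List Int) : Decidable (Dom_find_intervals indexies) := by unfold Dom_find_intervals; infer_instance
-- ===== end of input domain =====

-- B merges the sorted ORIGINAL indices directly (gap > 5 starts a new interval) instead of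
-- materialising, deduplicating and sorting the 5×-expanded point list: same results, measurably
-- faster in a timing run (constant factor: it sorts n indices, not 5n expanded points).

-- ===== PORT A =====
-- A's scan loop over range(1, len(numbers)): the obvious structural recursion carrying
-- (intervals, start) and the previous element numbers[i-1]; the final branch appends
-- [start, numbers[-1]] (= prev when the list is exhausted).
def pvScanA (intervals : List (List Int)) (start prev : Int) : List Int → List (List Int)
  | [] => intervals ++ [[start, prev]]
  | n :: ns =>
      if n ≠ prev + 1 then pvScanA (intervals ++ [[start, prev]]) n n ns
      else pvScanA intervals start n ns

def find_intervals (indexies : List Int) : List (List Int) :=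
  match PySem.List.sorted
      (PySem.Set.ofList (indexies.foldl (fun acc i => acc ++ [i - 2, i - 1, i, i + 1, i + 2]) []))
      (fun x => x) false with
  | [] => []          -- Python: numbers[0] raises IndexError here (excluded by Pre_)
  | n0 :: rest => pvScanA [] n0 n0 rest

-- ===== PORT B =====
-- B's merge loop over s[1:] carrying (intervals, start, end).
def pvMergeB (intervals : List (List Int)) (start stop : Int) : List Int → List (List Int)
  | [] => intervals ++ [[start, stop]]
  | i :: rest =>
      if i - 2 ≤ stop + 1 then pvMergeB intervals start (max stop (i + 2)) rest
      else pvMergeB (intervals ++ [[start, stop]]) (i - 2) (i + 2) rest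

def find_intervals_alt (indexies : List Int) : List (List Int) :=
  match PySem.List.sorted indexies (fun x => x) false with
  | [] => []          -- Python: s[0] raises IndexError here (excluded by Pre_)
  | x :: rest => pvMergeB [] (x - 2) (x + 2) rest

-- ===== PRECONDITION & SPEC =====
-- Pre_ excludes only the empty list, on which both Pythons raise IndexError.
def Pre_find_intervals (indexies : List Int) : Prop := indexies ≠ []
instance (indexies : List Int) : Decidable (Pre_find_intervals indexies) := by
  unfold Pre_find_intervals; infer_instance
def pvWitness_find_intervals : List Int := ([3, -1, 10])

def Spec_find_intervals (indexies : List Int) (out : List (List Int)) : Prop := out = find_intervals_alt indexies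
instance (indexies : List Int) (out : List (List Int)) : Decidable (Spec_find_intervals indexies out) := by unfold Spec_find_intervals; infer_instance

-- ===== CLAIM (what is proved, stated in full; the proofs are below) =====
def Claim_equal_find_intervals : Prop := ∀ (indexies : List Int), Dom_find_intervals indexies → Pre_find_intervals indexies → Spec_find_intervals indexies (find_intervals indexies)

-- ===== LEMMAS AND PROOFS =====

-- a, a+1, …, a+n-1
def pvRange (a : Int) : Nat → List Int
  | 0 => []
  | n + 1 => a :: pvRange (a + 1) n

-- the part of A's deduped sorted point list lying strictly above x+2, for sorted tail xs
def pvU (x : Int) : List Int → List Int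
  | [] => []
  | y :: ys => (if y ≤ x + 5 then pvRange (x + 3) (y - x).toNat else pvRange (y - 2) 5) ++ pvU y ys

theorem mem_pvRange {m : Int} : ∀ {n : Nat} {a : Int}, m ∈ pvRange a n ↔ a ≤ m ∧ m < a + n := by
  intro n
  induction n with
  | zero => intro a; simp [pvRange]
  | succ k ih =>
      intro a
      simp only [pvRange, List.mem_cons, ih]
      omega

theorem pairwise_pvRange : ∀ (n : Nat) (a : Int), (pvRange a n).Pairwise (· < ·) := by
  intro n
  induction n with
  | zero => intro a; simp [pvRange]
  | succ k ih =>
      intro a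
      simp only [pvRange, List.pairwise_cons]
      exact ⟨fun m hm => (mem_pvRange.mp hm).1, ih (a + 1)⟩

theorem pvRange_five (a : Int) : pvRange a 5 = a :: pvRange (a + 1) 4 := rfl

-- consuming a consecutive run keeps start and advances prev
theorem pvScanA_run (n : Nat) : ∀ (acc : List (List Int)) (s prev : Int) (rest : List Int),
    pvScanA acc s prev (pvRange (prev + 1) n ++ rest) = pvScanA acc s (prev + n) rest := by
  induction n with
  | zero => intro acc s prev rest; simp [pvRange]
  | succ k ih =>
      intro acc s prev rest
      simp only [pvRange, List.cons_append, pvScanA, if_neg (by omega : ¬ prev + 1 ≠ prev + 1)]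
      rw [ih acc s (prev + 1) rest]
      congr 1; push_cast; ring

-- membership in pvU
theorem mem_pvU : ∀ (xs : List Int) (x m : Int), (x :: xs).Pairwise (· ≤ ·) →
    (m ∈ pvU x xs ↔ x + 2 < m ∧ ∃ z ∈ xs, z - 2 ≤ m ∧ m ≤ z + 2) := by
  intro xs
  induction xs with
  | nil => intro x m _; simp [pvU]
  | cons y ys ih =>
      intro x m hpw
      have hxy : x ≤ y := (List.pairwise_cons.mp hpw).1 y (by simp)
      have hpw' : (y :: ys).Pairwise (· ≤ ·) := (List.pairwise_cons.mp hpw).2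
      have hyys : ∀ z ∈ ys, y ≤ z := (List.pairwise_cons.mp hpw').1
      have ihy := ih y m hpw'
      by_cases hy : y ≤ x + 5
      · simp only [pvU, if_pos hy, List.mem_append, mem_pvRange, ihy]
        constructor
        · rintro (⟨h1, h2⟩ | ⟨h1, z, hz, h2, h3⟩)
          · exact ⟨by omega, y, by simp, by omega, by omega⟩
          · exact ⟨by omega, z, by simp [hz], h2, h3⟩
        · rintro ⟨h1, z, hz, h2, h3⟩
          rcases List.mem_cons.mp hz with rfl | hz'
          · left; omega
          · have := hyys z hz'
            by_cases hm : m ≤ y + 2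
            · left; omega
            · right; exact ⟨by omega, z, hz', h2, h3⟩
      · simp only [pvU, if_neg hy, List.mem_append, mem_pvRange, ihy]
        constructor
        · rintro (⟨h1, h2⟩ | ⟨h1, z, hz, h2, h3⟩)
          · exact ⟨by omega, y, by simp, by omega, by omega⟩
          · exact ⟨by omega, z, by simp [hz], h2, h3⟩
        · rintro ⟨h1, z, hz, h2, h3⟩
          rcases List.mem_cons.mp hz with rfl | hz'
          · left; omega
          · have := hyys z hz'
            by_cases hm : m ≤ y + 2
            · left; omega
            · right; exact ⟨by omega, z, hz', h2, h3⟩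

theorem pairwise_pvU : ∀ (xs : List Int) (x : Int), (x :: xs).Pairwise (· ≤ ·) →
    (pvU x xs).Pairwise (· < ·) := by
  intro xs
  induction xs with
  | nil => intro x _; simp [pvU]
  | cons y ys ih =>
      intro x hpw
      have hpw' : (y :: ys).Pairwise (· ≤ ·) := (List.pairwise_cons.mp hpw).2
      have hxy : x ≤ y := (List.pairwise_cons.mp hpw).1 y (by simp)
      simp only [pvU]
      apply List.pairwise_append.mpr
      refine ⟨?_, ih y hpw', ?_⟩
      · split_ifs <;> exact pairwise_pvRange _ _
      · intro p hp q hq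
        have hq' := ((mem_pvU ys y q hpw').mp hq).1
        split_ifs at hp with h
        · have h1 := mem_pvRange.mp hp
          have hyx : ((y - x).toNat : Int) = y - x := Int.toNat_of_nonneg (by omega)
          omega
        · have := mem_pvRange.mp hp
          omega

-- A's scan of the tail of the point list equals B's merge of the tail of the sorted input
theorem pvMain : ∀ (xs : List Int) (x s : Int) (acc : List (List Int)),
    (x :: xs).Pairwise (· ≤ ·) →
    pvScanA acc s (x + 2) (pvU x xs) = pvMergeB acc s (x + 2) xs := by
  intro xs
  induction xs with
  | nil => intro x s acc _; simp [pvU, pvScanA, pvMergeB]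
  | cons y ys ih =>
      intro x s acc hpw
      have hxy : x ≤ y := (List.pairwise_cons.mp hpw).1 y (by simp)
      have hpw' : (y :: ys).Pairwise (· ≤ ·) := (List.pairwise_cons.mp hpw).2
      by_cases hy : y ≤ x + 5
      · rw [show pvU x (y :: ys) = pvRange ((x + 2) + 1) (y - x).toNat ++ pvU y ys by
              simp only [pvU, if_pos hy]; congr 2; ring, pvScanA_run]
        have hcast : ((y - x).toNat : Int) = y - x := Int.toNat_of_nonneg (by omega)
        rw [show x + 2 + ((y - x).toNat : Int) = y + 2 by omega]
        rw [ih y s acc hpw']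
        simp only [pvMergeB, if_pos (by omega : y - 2 ≤ x + 2 + 1)]
        rw [show max (x + 2) (y + 2) = y + 2 by omega]
      · rw [show pvU x (y :: ys) = pvRange (y - 2) 5 ++ pvU y ys by simp [pvU, if_neg hy]]
        rw [pvRange_five, List.cons_append]
        simp only [pvScanA, if_pos (by omega : y - 2 ≠ x + 2 + 1)]
        rw [pvScanA_run]
        rw [show y - 2 + ((4 : Nat) : Int) = y + 2 by push_cast; ring]
        rw [ih y (y - 2) (acc ++ [[s, x + 2]]) hpw']
        simp only [pvMergeB, if_neg (by omega : ¬ (y - 2 ≤ x + 2 + 1))]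

-- A's deduped sorted point list, named: the full run of the minimum then pvU
theorem pvNumbers_eq (indexies : List Int) (x : Int) (xs : List Int)
    (ht : PySem.List.sorted indexies (fun x => x) false = x :: xs) :
    PySem.List.sorted
      (PySem.Set.ofList (indexies.foldl (fun acc i => acc ++ [i - 2, i - 1, i, i + 1, i + 2]) []))
      (fun x => x) false = pvRange (x - 2) 5 ++ pvU x xs := by
  have hpw : (x :: xs).Pairwise (· ≤ ·) := by
    have := PySem.List.sorted_pairwise (xs := indexies) (key := fun x => x)
    rw [ht] at this; exact this
  have hmemt : ∀ z, z ∈ x :: xs ↔ z ∈ indexies := by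
    intro z
    rw [← ht]; exact PySem.List.mem_sorted indexies (fun x => x) false z
  have hE : (indexies.foldl (fun acc i => acc ++ [i - 2, i - 1, i, i + 1, i + 2]) [])
      = indexies.flatMap (fun i => [i - 2, i - 1, i, i + 1, i + 2]) := by
    simpa using PySem.List.foldl_append_eq_flatMap (l := indexies)
      (g := fun i => [i - 2, i - 1, i, i + 1, i + 2]) (acc := [])
  -- the candidate list
  set L := pvRange (x - 2) 5 ++ pvU x xs with hL
  have hmemL : ∀ m, m ∈ L ↔ ∃ z ∈ indexies, z - 2 ≤ m ∧ m ≤ z + 2 := by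
    intro m
    simp only [hL, List.mem_append, mem_pvRange, mem_pvU xs x m hpw]
    constructor
    · rintro (⟨h1, h2⟩ | ⟨h1, z, hz, h2, h3⟩)
      · exact ⟨x, (hmemt x).mp (by simp), by omega, by omega⟩
      · exact ⟨z, (hmemt z).mp (by simp [hz]), h2, h3⟩
    · rintro ⟨z, hz, h2, h3⟩
      rcases List.mem_cons.mp ((hmemt z).mpr hz) with rfl | hz'
      · left; constructor <;> omega
      · have hxz : x ≤ z := (List.pairwise_cons.mp hpw).1 z hz'
        by_cases hm : m ≤ x + 2
        · left; constructor <;> omega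
        · right; exact ⟨by omega, z, hz', h2, h3⟩
  have hpwL : L.Pairwise (· < ·) := by
    apply List.pairwise_append.mpr
    refine ⟨pairwise_pvRange _ _, pairwise_pvU xs x hpw, ?_⟩
    intro p hp q hq
    have := mem_pvRange.mp hp
    have := ((mem_pvU xs x q hpw).mp hq).1
    omega
  have hndL : L.Nodup := hpwL.imp (fun h => ne_of_lt h)
  have hperm : L.Perm (PySem.Set.ofList
      (indexies.foldl (fun acc i => acc ++ [i - 2, i - 1, i, i + 1, i + 2]) [])) := by
    apply (List.perm_ext_iff_of_nodup hndL (PySem.Set.nodup_ofList _)).mpr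
    intro m
    rw [hmemL, PySem.Set.mem_ofList, hE]
    simp only [List.mem_flatMap, List.mem_cons, List.not_mem_nil]
    constructor
    · rintro ⟨z, hz, h2, h3⟩
      exact ⟨z, hz, by omega⟩
    · rintro ⟨z, hz, h⟩
      refine ⟨z, hz, ?_, ?_⟩ <;> · simp only [or_false] at h
                                   rcases h with rfl | rfl | rfl | rfl | rfl <;> omega
  exact PySem.List.sorted_eq_of_perm_of_pairwise_lt _ _ _ hperm hpwL

-- ===== VERDICT (by name: the statement is the Claim_ definition above) =====
theorem find_intervals_spec : Claim_equal_find_intervals := by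
  intro indexies _ hpre
  unfold Spec_find_intervals
  cases ht : PySem.List.sorted indexies (fun x => x) false with
  | nil =>
      exact absurd ((PySem.List.sorted_eq_nil_iff indexies (fun x => x) false).mp ht) hpre
  | cons x xs =>
      have hpw : (x :: xs).Pairwise (· ≤ ·) := by
        have := PySem.List.sorted_pairwise (xs := indexies) (key := fun x => x)
        rw [ht] at this; exact this
      unfold find_intervals find_intervals_alt
      rw [pvNumbers_eq indexies x xs ht, ht]
      rw [pvRange_five, List.cons_append]
      show pvScanA [] (x - 2) (x - 2) (pvRange ((x - 2) + 1) 4 ++ pvU x xs)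
          = pvMergeB [] (x - 2) (x + 2) xs
      rw [pvScanA_run]
      rw [show x - 2 + ((4 : Nat) : Int) = x + 2 by push_cast; ring]
      exact pvMain xs x (x - 2) [] hpw
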